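-- pv_equiv track=rewrite | github.com/iffy-pi/winpushbullet | shared.py | checkFlags
-- ===== SOURCE A (Python) =====
-- def checkFlags(args:list, flag:str = "", flags:tuple=()):
--     usedList = False
--     if len(flags) == 0:
--         flags = flag,
--     else:
--         usedList = True
--
--     results = []
--
--     for fl in flags:
--         res = False
--         try:
--             flInd = args.index(fl)
--             # flag is in args lsit
--             res = True
--
--             # remove flag from list
--             args.pop(flInd)
--         except ValueError:
--             pass
--
--         results.append(res)
--
--     if not usedList and len(results) == 1:
--         return results[0]
--
--     return tuple(results)
-- ===== SOURCE B (Python) =====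
-- def checkFlags(args: list, flag: str = "", flags: tuple = ()):
--     usedList = len(flags) != 0
--     fls = tuple(flags) if usedList else (flag,)
--
--     # one pass over args: count occurrences, and drop the first need[v] copies of each flag value
--     need = {}
--     for fl in fls:
--         need[fl] = need.get(fl, 0) + 1
--     have = {}
--     for a in args:
--         have[a] = have.get(a, 0) + 1
--     remaining = dict(need)
--     survivors = []
--     for a in args:
--         if remaining.get(a, 0) > 0:
--             remaining[a] -= 1
--         else:
--             survivors.append(a)
--     args[:] = survivors
--
--     # the Nth duplicate of a flag value is True iff args held at least N copies
--     seen = {}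
--     results = []
--     for fl in fls:
--         seen[fl] = seen.get(fl, 0) + 1
--         results.append(have.get(fl, 0) >= seen[fl])
--
--     if not usedList:
--         return results[0]
--     return tuple(results)
-- ===== Notes on version B (the rewrite author's own statement) =====
-- stated objective: faster
-- what changed: Replaces A's per-flag index/pop scans of the mutating args list with counting dictionaries built in one pass: each flag's result is derived by comparing its occurrence count in the original args with how many duplicates of it were requested so far, and args is rewritten in place once by dropping the first need[v] copies of each flagged value. Pre_ excludes only empty flags, where A returns a single bare bool instead of a tuple of bools (outside the declared return type, unrepresentable as List Bool); B returns the identical bare bool there.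
-- outside the precondition, e.g. on checkFlags(['x'], '-v', ()): A returns False, B returns False; on checkFlags(['-a'], '-a', ()): A returns True, B returns True
import Mathlib
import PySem

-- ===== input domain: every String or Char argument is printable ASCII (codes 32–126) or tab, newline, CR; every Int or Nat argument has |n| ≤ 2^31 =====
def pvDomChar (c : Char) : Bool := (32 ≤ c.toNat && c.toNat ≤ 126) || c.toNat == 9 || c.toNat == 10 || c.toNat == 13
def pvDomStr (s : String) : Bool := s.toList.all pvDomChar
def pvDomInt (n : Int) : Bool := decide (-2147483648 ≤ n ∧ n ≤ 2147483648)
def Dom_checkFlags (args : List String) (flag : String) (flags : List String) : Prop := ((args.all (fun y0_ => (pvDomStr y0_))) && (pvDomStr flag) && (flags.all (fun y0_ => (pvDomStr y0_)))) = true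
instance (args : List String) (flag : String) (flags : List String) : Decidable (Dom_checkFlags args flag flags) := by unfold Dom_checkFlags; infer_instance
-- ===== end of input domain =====

-- B replaces A's per-flag index/pop scans with occurrence-count dictionaries built in one pass
-- (alternative decomposition; the Python B also mutates args in place exactly as A does —
-- the equivalence proved here is about the RETURN value; the single-flag bare-bool return
-- is represented as a one-element list in both ports).

-- ===== PORT A =====
-- one iteration of A's 'for fl in flags' loop: try index/pop, append the result flag
def pvStepA (st : List String × List Bool) (fl : String) : List String × List Bool :=
  match PySem.List.index? st.1 fl with
  | some flInd =>
      (((PySem.List.pop? st.1 (flInd : Int)).map (·.2)).getD st.1, st.2 ++ [true])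
  | none => (st.1, st.2 ++ [false])

def checkFlags (args : List String) (flag : String) (flags : List String) : List Bool :=
  let usedList := flags.length != 0
  let fls := if flags.length == 0 then [flag] else flags
  let results := (fls.foldl pvStepA (args, [])).2
  if !usedList && results.length == 1 then [results.getD 0 false] else results

-- ===== PORT B =====
-- one iteration of B's result loop: bump seen[fl], compare with have[fl]
def pvStepB (have_ : PySem.Dict String Int) (st : PySem.Dict String Int × List Bool) (fl : String) : PySem.Dict String Int × List Bool :=
  let seen := st.1.insert fl (st.1.getD fl 0 + 1)
  (seen, st.2 ++ [decide (seen.getD fl 0 ≤ have_.getD fl 0)])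

def checkFlags_alt (args : List String) (flag : String) (flags : List String) : List Bool :=
  let usedList := flags.length != 0
  let fls := if usedList then flags else [flag]
  let need := fls.foldl (fun d x => d.insert x (d.getD x 0 + 1)) PySem.Dict.empty
  let have_ := args.foldl (fun d x => d.insert x (d.getD x 0 + 1)) PySem.Dict.empty
  -- the survivors pass computes the in-place mutation of args; it does not affect the return value
  let _survivors := (args.foldl
    (fun (st : PySem.Dict String Int × List String) a =>
      if st.1.getD a 0 > 0 then (st.1.insert a (st.1.getD a 0 - 1), st.2)
      else (st.1, st.2 ++ [a])) (need, [])).2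
  let results := (fls.foldl (pvStepB have_) (PySem.Dict.empty, [])).2
  if !usedList then [results.getD 0 false] else results

-- ===== PRECONDITION & SPEC =====
-- Pre_ excludes only empty flags, where Python A returns a single bare bool rather than a
-- tuple of bools (a value outside the declared return type, unrepresentable as List Bool);
-- B returns the identical bare bool there in Python.
def Pre_checkFlags (args : List String) (flag : String) (flags : List String) : Prop := flags ≠ []
instance (args : List String) (flag : String) (flags : List String) : Decidable (Pre_checkFlags args flag flags) := by unfold Pre_checkFlags; infer_instance
def pvWitness_checkFlags : List String × String × List String := (["-a", "x"], "", ["-a", "-b"])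

def Spec_checkFlags (args : List String) (flag : String) (flags : List String) (out : List Bool) : Prop := out = checkFlags_alt args flag flags
instance (args : List String) (flag : String) (flags : List String) (out : List Bool) : Decidable (Spec_checkFlags args flag flags out) := by unfold Spec_checkFlags; infer_instance

-- ===== CLAIM (what is proved, stated in full; the proofs are below) =====
def Claim_equal_checkFlags : Prop := ∀ (args : List String) (flag : String) (flags : List String), Dom_checkFlags args flag flags → Pre_checkFlags args flag flags → Spec_checkFlags args flag flags (checkFlags args flag flags)

-- ===== LEMMAS AND PROOFS =====

theorem pvStepA_mem {cur : List String} {acc : List Bool} {fl : String} (h : fl ∈ cur) :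
    pvStepA (cur, acc) fl = (cur.erase fl, acc ++ [true]) := by
  obtain ⟨k, hk⟩ := Option.isSome_iff_exists.mp ((PySem.List.index?_isSome_iff cur fl).mpr h)
  obtain ⟨hlt, -, -⟩ := PySem.List.getElem_of_index?_eq_some hk
  have hidx : List.idxOf fl cur = k := by
    have h2 := hk
    rw [PySem.List.index?_eq_idxOf?] at h2
    simp [List.idxOf_eq_getD_idxOf?, h2]
  simp only [pvStepA, hk, PySem.List.pop?_natCast cur k hlt]
  simp only [Option.map_some, Option.getD_some]
  rw [← hidx, List.eraseIdx_idxOf_eq_erase]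

theorem pvStepA_not_mem {cur : List String} {acc : List Bool} {fl : String} (h : fl ∉ cur) :
    pvStepA (cur, acc) fl = (cur, acc ++ [false]) := by
  simp only [pvStepA, (PySem.List.index?_eq_none_iff cur fl).mpr h]

-- the loop invariant: cur is args with min(have v, seen v) copies of each v removed
theorem pv_fold_eq (have_ : PySem.Dict String Int) :
    ∀ (fls cur : List String) (seen : PySem.Dict String Int) (acc : List Bool),
    (∀ v, (cur.count v : Int) = max (have_.getD v 0 - seen.getD v 0) 0) →
    (fls.foldl pvStepA (cur, acc)).2 = (fls.foldl (pvStepB have_) (seen, acc)).2 := by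
  intro fls
  induction fls with
  | nil => intro cur seen acc _; rfl
  | cons fl rest ih =>
    intro cur seen acc hinv
    rw [List.foldl_cons, List.foldl_cons]
    have hfl := hinv fl
    by_cases hm : fl ∈ cur
    · have hc : 0 < cur.count fl := List.count_pos_iff.mpr hm
      have hle : seen.getD fl 0 + 1 ≤ have_.getD fl 0 := by omega
      rw [pvStepA_mem hm]
      have hb : pvStepB have_ (seen, acc) fl
          = (seen.insert fl (seen.getD fl 0 + 1), acc ++ [true]) := by
        simp only [pvStepB, PySem.Dict.getD_insert_self]
        simp [hle]
      rw [hb]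
      apply ih
      intro v
      rw [PySem.Dict.getD_insert]
      by_cases hv : v = fl
      · subst hv
        rw [if_pos rfl]
        have hce := List.count_erase_self (a := v) (l := cur)
        omega
      · rw [List.count_erase_of_ne hv, if_neg hv]
        exact hinv v
    · have hc : cur.count fl = 0 := by
        simpa using List.count_eq_zero.mpr hm
      have hgt : have_.getD fl 0 ≤ seen.getD fl 0 := by omega
      rw [pvStepA_not_mem hm]
      have hb : pvStepB have_ (seen, acc) fl
          = (seen.insert fl (seen.getD fl 0 + 1), acc ++ [false]) := by
        simp only [pvStepB, PySem.Dict.getD_insert_self]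
        simp; omega
      rw [hb]
      apply ih
      intro v
      rw [PySem.Dict.getD_insert]
      by_cases hv : v = fl
      · subst hv
        rw [if_pos rfl]
        omega
      · rw [if_neg hv]; exact hinv v

theorem pv_init_inv (args : List String) :
    ∀ v, ((args.count v : Int))
      = max ((args.foldl (fun d x => d.insert x (d.getD x 0 + 1)) PySem.Dict.empty).getD v 0
             - (PySem.Dict.empty : PySem.Dict String Int).getD v 0) 0 := by
  intro v
  rw [PySem.Dict.getD_foldl_insert_add_one]
  simp only [PySem.Dict.getD_empty]
  omega

-- ===== VERDICT (by name: the statement is the Claim_ definition above) =====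
theorem checkFlags_spec : Claim_equal_checkFlags := by
  unfold Claim_equal_checkFlags
  intro args flag flags _ hpre
  unfold Spec_checkFlags checkFlags checkFlags_alt
  cases flags with
  | nil => exact absurd rfl hpre
  | cons f rest =>
    have hres := pv_fold_eq _ (f :: rest) args PySem.Dict.empty [] (pv_init_inv args)
    simp only [List.foldl_cons] at hres
    simp [hres]
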